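-- pv_equiv track=rewrite | github.com/Patxi91/CodeWars_Cloud | 6kyu-Back and forth then Reverse-Patxi.py | arrange3
-- ===== SOURCE A (Python) =====
-- import math
--
-- def arrange3(s):
--     t = []
--     sc = [x for x in s]
--     for seq in range(math.ceil(len(s)/2)-1):
--         a, *b, c = sc
--         t.extend((a, c))
--         sc = b[::-1]
--     t.extend(sc)
--     return t
-- ===== SOURCE B (Python) =====
-- def arrange3(s):
--     # one pass, two pointers with a direction toggle; no repeated slicing/reversal
--     out = []
--     lo, hi, flip = 0, len(s) - 1, False
--     while hi - lo >= 2: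
--         out += [s[hi], s[lo]] if flip else [s[lo], s[hi]]
--         lo, hi, flip = lo + 1, hi - 1, not flip
--     tail = s[lo:hi + 1]
--     return out + (tail[::-1] if flip else tail)
-- ===== Notes on version B (the rewrite author's own statement) =====
-- stated objective: faster
-- what changed: Replaces A's per-iteration tuple-unpacking of a fresh list plus middle-reversal copy with a single two-pointer pass over the original list using a direction toggle instead of physical reversal.
import Mathlib
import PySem

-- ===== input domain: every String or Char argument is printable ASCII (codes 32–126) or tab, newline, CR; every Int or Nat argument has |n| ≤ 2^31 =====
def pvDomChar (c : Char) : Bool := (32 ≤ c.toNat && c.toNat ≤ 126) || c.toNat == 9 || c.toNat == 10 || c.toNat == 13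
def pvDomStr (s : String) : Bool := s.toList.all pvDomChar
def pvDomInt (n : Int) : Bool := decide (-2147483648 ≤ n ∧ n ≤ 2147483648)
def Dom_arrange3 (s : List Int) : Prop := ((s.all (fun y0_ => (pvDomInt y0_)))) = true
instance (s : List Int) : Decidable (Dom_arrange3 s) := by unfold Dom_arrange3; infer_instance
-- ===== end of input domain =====

-- B replaces A's repeated head/last unpacking + middle-reversal copies by a single
-- two-pointer pass with a direction toggle; same return value on every input.

-- ===== PORT A =====
-- loop body: a, *b, c = sc; t.extend((a, c)); sc = b[::-1]  — a = sc[0], c = sc[-1], b = sc[1:-1].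
-- The unpacking is only ever executed with len(sc) >= 3 (k <= ceil(len sc / 2) - 1 throughout),
-- so the head!/getLast! defaults below are never reached where Python would raise.
def arrange3Go : Nat → List Int → List Int
  | 0, sc => sc
  | k + 1, sc => sc.head! :: sc.getLast! :: arrange3Go k (((sc.drop 1).dropLast).reverse)

-- math.ceil(len(s)/2) = (len s + 1) / 2 exactly (lengths are far below 2^53)
def arrange3 (s : List Int) : List Int := arrange3Go ((s.length + 1) / 2 - 1) s

-- ===== PORT B =====
-- while hi - lo >= 2: emit the pair (toggled); then the remaining slice s[lo:hi+1] (toggled).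
-- lo, hi are Nat: hi = len-1 truncates to 0 only for s = [], where the slice is [] as in Python.
def arrange3AltGo (s : List Int) (lo hi : Nat) (flip : Bool) : List Int :=
  if lo + 2 ≤ hi then
    (if flip then [s.getD hi 0, s.getD lo 0] else [s.getD lo 0, s.getD hi 0])
      ++ arrange3AltGo s (lo + 1) (hi - 1) (!flip)
  else
    (if flip then ((s.drop lo).take (hi + 1 - lo)).reverse else (s.drop lo).take (hi + 1 - lo))
termination_by hi - lo
decreasing_by omega

def arrange3_alt (s : List Int) : List Int := arrange3AltGo s 0 (s.length - 1) false

-- ===== PRECONDITION & SPEC =====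
def Spec_arrange3 (s : List Int) (out : List Int) : Prop := out = arrange3_alt s
instance (s : List Int) (out : List Int) : Decidable (Spec_arrange3 s out) := by unfold Spec_arrange3; infer_instance

-- ===== CLAIM (what is proved, stated in full; the proofs are below) =====
def Claim_equal_arrange3 : Prop := ∀ (s : List Int), Dom_arrange3 s → Spec_arrange3 s (arrange3 s)

-- ===== LEMMAS AND PROOFS =====

theorem arrange3Go_cons_concat (k : Nat) (a c : Int) (m : List Int) :
    arrange3Go (k + 1) (a :: m ++ [c]) = a :: c :: arrange3Go k m.reverse := by
  simp [arrange3Go]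
  rw [show a :: (m ++ [c]) = (a :: m) ++ [c] from by simp, List.getLast?_concat]
  rfl

theorem seg_decomp (s : List Int) (lo hi : Nat) (h2 : lo + 2 ≤ hi) (hh : hi < s.length) :
    (s.drop lo).take (hi + 1 - lo)
      = s[lo]'(by omega) :: ((s.drop (lo + 1)).take (hi - 1 + 1 - (lo + 1))) ++ [s[hi]'hh] := by
  have hlo : lo < s.length := by omega
  have e1 : s.drop lo = s[lo]'hlo :: s.drop (lo + 1) := List.drop_eq_getElem_cons hlo
  have e2 : hi + 1 - lo = (hi - lo - 1) + 1 + 1 := by omega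
  rw [e1, e2, List.take_succ_cons, List.take_succ]
  have e3 : (s.drop (lo + 1))[hi - lo - 1]? = some (s[hi]'hh) := by
    rw [List.getElem?_drop]
    have : lo + 1 + (hi - lo - 1) = hi := by omega
    rw [this, List.getElem?_eq_getElem hh]
  rw [e3]
  have e4 : hi - 1 + 1 - (lo + 1) = hi - lo - 1 := by omega
  simp [e4]

theorem key (len : Nat) : ∀ (lo hi : Nat) (s : List Int) (flip : Bool), hi < s.length →
    len = hi + 1 - lo →
    arrange3Go ((len + 1) / 2 - 1)
        (if flip then ((s.drop lo).take len).reverse else (s.drop lo).take len)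
      = arrange3AltGo s lo hi flip := by
  induction len using Nat.strong_induction_on with
  | _ len ih =>
    intro lo hi s flip hh hlen
    rw [arrange3AltGo]
    by_cases h2 : lo + 2 ≤ hi
    · rw [if_pos h2]
      have hk : (len + 1) / 2 - 1 = ((len - 2 + 1) / 2 - 1) + 1 := by omega
      have hd := seg_decomp s lo hi h2 hh
      have hgd_lo : s.getD lo 0 = s[lo]'(by omega) := List.getD_eq_getElem s 0 (by omega)
      have hgd_hi : s.getD hi 0 = s[hi]'hh := List.getD_eq_getElem s 0 hh
      have ihm := ih (len - 2) (by omega) (lo + 1) (hi - 1) s (!flip) (by omega) (by omega)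
      have hm2 : hi - 1 + 1 - (lo + 1) = len - 2 := by omega
      rw [hm2] at hd
      rw [← hlen] at hd
      cases flip with
      | false =>
        simp only [Bool.not_false, if_pos] at ihm
        simp only [if_neg (by decide : ¬ (false = true))]
        rw [hd, hk, arrange3Go_cons_concat, ihm, hgd_lo, hgd_hi]
        simp
      | true =>
        simp only [Bool.not_true, if_neg (by decide : ¬ (false = true))] at ihm
        simp only [if_pos]
        rw [hd, hk]
        have hrev : (s[lo]'(by omega) :: ((s.drop (lo + 1)).take (len - 2)) ++ [s[hi]'hh]).reverse
            = s[hi]'hh :: ((s.drop (lo + 1)).take (len - 2)).reverse ++ [s[lo]'(by omega)] := by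
          simp
        rw [hrev, arrange3Go_cons_concat, List.reverse_reverse, ihm, hgd_lo, hgd_hi]
        simp
    · rw [if_neg h2]
      have hk0 : (len + 1) / 2 - 1 = 0 := by omega
      rw [hk0, hlen]
      cases flip <;> simp [arrange3Go]

-- ===== VERDICT (by name: the statement is the Claim_ definition above) =====
theorem arrange3_spec : Claim_equal_arrange3 := by
  intro s _
  unfold Spec_arrange3 arrange3 arrange3_alt
  cases s with
  | nil => rw [arrange3AltGo]; simp [arrange3Go]
  | cons x xs =>
    have h := key (x :: xs).length 0 ((x :: xs).length - 1) (x :: xs) false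
      (by simp) (by simp)
    simpa using h
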